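-- pv_equiv track=rewrite | github.com/lamux04/proyecto-alumno-colaborador | pcap-prueba/grafo.py | obtener_conexiones
-- ===== SOURCE A (Python) =====
-- def obtener_conexiones(comunicaciones):
--     '''
--     Procesa el array de comunicaciones y obtiene las diferentes conexiones
--     '''
--     conexiones = {}
--
--     # Obtenemos las diferentes conexiones que se producen
--     for com in comunicaciones:
--         ip_origen = com["ip_origen"]
--         if ip_origen in conexiones:
--             conexiones[ip_origen].add(com["ip_destino"])
--         else:
--             conexiones[ip_origen] = set([com["ip_destino"]])
--
--     return conexiones
-- ===== SOURCE B (Python) =====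
-- def obtener_conexiones(comunicaciones):
--     '''
--     Procesa el array de comunicaciones y obtiene las diferentes conexiones
--     '''
--     # Pass 1: the distinct source IPs, in first-occurrence order.
--     fuentes = []
--     for com in comunicaciones:
--         if com["ip_origen"] not in fuentes:
--             fuentes.append(com["ip_origen"])
--     # Pass 2: for each source, collect all its destinations in one scan.
--     return {src: set(com["ip_destino"] for com in comunicaciones
--                      if com["ip_origen"] == src)
--             for src in fuentes}
-- ===== Notes on version B (the rewrite author's own statement) =====
-- stated objective: alternative
-- what changed: B replaces A's single incremental pass that updates a per-key set in a hash dict by a two-phase grouping: first collect the distinct source IPs in first-occurrence order, then build the result with one full scan per source via a dict comprehension.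
import Mathlib
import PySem

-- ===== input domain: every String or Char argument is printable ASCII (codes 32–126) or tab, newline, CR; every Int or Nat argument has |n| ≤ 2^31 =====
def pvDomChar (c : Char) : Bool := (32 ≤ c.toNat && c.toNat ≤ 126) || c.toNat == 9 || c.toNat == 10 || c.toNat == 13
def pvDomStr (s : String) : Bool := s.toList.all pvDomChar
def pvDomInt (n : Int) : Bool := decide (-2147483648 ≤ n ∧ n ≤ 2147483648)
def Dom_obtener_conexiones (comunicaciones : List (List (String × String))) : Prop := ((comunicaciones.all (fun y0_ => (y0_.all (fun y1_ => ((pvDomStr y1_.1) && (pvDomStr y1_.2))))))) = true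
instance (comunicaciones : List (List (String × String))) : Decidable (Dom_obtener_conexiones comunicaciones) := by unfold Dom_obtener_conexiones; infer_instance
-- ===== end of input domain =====

-- B replaces A's single incremental hash-dict pass by a two-phase grouping (distinct
-- sources first, then one scan per source); equivalence of the RETURN values is proved.

-- com["k"] : lookup in the Python dict that the association list `com` denotes
def pvGet (com : List (String × String)) (k : String) : Option String :=
  (PySem.Dict.ofList com).get? k

-- ===== PORT A =====
-- the body of A's for-loop (the `_, _` branch is Python's KeyError, excluded by Pre_)
def pvStepA (conexiones : PySem.Dict String (List String)) (com : List (String × String)) :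
    PySem.Dict String (List String) :=
  match pvGet com "ip_origen", pvGet com "ip_destino" with
  | some ip_origen, some ip_destino =>
      if conexiones.contains ip_origen then
        conexiones.insert ip_origen (PySem.Set.add (conexiones.getD ip_origen []) ip_destino)
      else
        conexiones.insert ip_origen (PySem.Set.ofList [ip_destino])
  | _, _ => conexiones

def obtener_conexiones (comunicaciones : List (List (String × String))) : List (String × List String) :=
  (comunicaciones.foldl pvStepA PySem.Dict.empty).items

-- ===== PORT B =====
-- pass 1: distinct source IPs in first-occurrence order (the `none` case is KeyError, excluded by Pre_)
def pvFuentes (comunicaciones : List (List (String × String))) : List String :=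
  comunicaciones.foldl (fun fuentes com =>
    match pvGet com "ip_origen" with
    | some o => if o ∈ fuentes then fuentes else fuentes ++ [o]
    | none => fuentes) []

-- pass 2: set(com["ip_destino"] for com in comunicaciones if com["ip_origen"] == src)
-- (filterMap drops a missing "ip_destino"; that is Python's KeyError, excluded by Pre_)
def pvDestinos (comunicaciones : List (List (String × String))) (src : String) : List String :=
  PySem.Set.ofList
    ((comunicaciones.filter (fun com => pvGet com "ip_origen" == some src)).filterMap
      (fun com => pvGet com "ip_destino"))

def obtener_conexiones_alt (comunicaciones : List (List (String × String))) : List (String × List String) :=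
  (pvFuentes comunicaciones).map (fun src => (src, pvDestinos comunicaciones src))

-- ===== PRECONDITION & SPEC =====
-- Pre_ excludes exactly the inputs on which A raises KeyError: a communication dict
-- missing the key "ip_origen" or the key "ip_destino".
def Pre_obtener_conexiones (comunicaciones : List (List (String × String))) : Prop :=
  ∀ com ∈ comunicaciones,
    (PySem.Dict.ofList com).contains "ip_origen" = true ∧
    (PySem.Dict.ofList com).contains "ip_destino" = true
instance (comunicaciones : List (List (String × String))) : Decidable (Pre_obtener_conexiones comunicaciones) := by unfold Pre_obtener_conexiones; infer_instance

def pvWitness_obtener_conexiones : (List (List (String × String))) :=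
  [[("ip_origen", "10.0.0.1"), ("ip_destino", "10.0.0.2")],
   [("ip_origen", "10.0.0.1"), ("ip_destino", "10.0.0.3")]]

def Spec_obtener_conexiones (comunicaciones : List (List (String × String))) (out : List (String × List String)) : Prop := out = obtener_conexiones_alt comunicaciones
instance (comunicaciones : List (List (String × String))) (out : List (String × List String)) : Decidable (Spec_obtener_conexiones comunicaciones out) := by unfold Spec_obtener_conexiones; infer_instance

-- ===== CLAIM (what is proved, stated in full; the proofs are below) =====
def Claim_equal_obtener_conexiones : Prop := ∀ (comunicaciones : List (List (String × String))), Dom_obtener_conexiones comunicaciones → Pre_obtener_conexiones comunicaciones → Spec_obtener_conexiones comunicaciones (obtener_conexiones comunicaciones)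

-- ===== LEMMAS AND PROOFS =====

-- membership in pass 1's accumulator
theorem pvFuentes_go_mem (l : List (List (String × String))) (acc : List String) (x : String) :
    x ∈ l.foldl (fun fuentes com =>
      match pvGet com "ip_origen" with
      | some o => if o ∈ fuentes then fuentes else fuentes ++ [o]
      | none => fuentes) acc ↔
    x ∈ acc ∨ ∃ com ∈ l, pvGet com "ip_origen" = some x := by
  induction l generalizing acc with
  | nil => simp
  | cons c t ih =>
    simp only [List.foldl_cons, ih, List.mem_cons]
    cases h : pvGet c "ip_origen" with
    | none => simp [h]
    | some o =>
      by_cases ho : o ∈ acc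
      · simp only [if_pos ho]
        constructor
        · rintro (hx | ⟨com, hc, hg⟩)
          · exact Or.inl hx
          · exact Or.inr ⟨com, Or.inr hc, hg⟩
        · rintro (hx | ⟨com, (rfl | hc), hg⟩)
          · exact Or.inl hx
          · rw [h] at hg; cases hg; exact Or.inl ho
          · exact Or.inr ⟨com, hc, hg⟩
      · simp only [if_neg ho, List.mem_append, List.mem_singleton]
        constructor
        · rintro ((hx | rfl) | ⟨com, hc, hg⟩)
          · exact Or.inl hx
          · exact Or.inr ⟨c, Or.inl rfl, h⟩
          · exact Or.inr ⟨com, Or.inr hc, hg⟩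
        · rintro (hx | ⟨com, (rfl | hc), hg⟩)
          · exact Or.inl (Or.inl hx)
          · rw [h] at hg; cases hg; exact Or.inl (Or.inr rfl)
          · exact Or.inr ⟨com, hc, hg⟩

theorem pvFuentes_mem (l : List (List (String × String))) (x : String) :
    x ∈ pvFuentes l ↔ ∃ com ∈ l, pvGet com "ip_origen" = some x := by
  unfold pvFuentes; rw [pvFuentes_go_mem]; simp

theorem pvFuentes_go_nodup (l : List (List (String × String))) (acc : List String)
    (h : acc.Nodup) :
    (l.foldl (fun fuentes com =>
      match pvGet com "ip_origen" with
      | some o => if o ∈ fuentes then fuentes else fuentes ++ [o]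
      | none => fuentes) acc).Nodup := by
  induction l generalizing acc with
  | nil => exact h
  | cons c t ih =>
    simp only [List.foldl_cons]
    cases hg : pvGet c "ip_origen" with
    | none => exact ih acc h
    | some o =>
      by_cases ho : o ∈ acc
      · simp only [if_pos ho]; exact ih acc h
      · simp only [if_neg ho]
        refine ih _ ?_
        rw [List.nodup_append]
        refine ⟨h, List.nodup_singleton o, ?_⟩
        intro a ha b hb
        have hbo : b = o := by simpa using hb
        subst hbo
        exact fun hab => ho (hab ▸ ha)

theorem pvFuentes_nodup (l : List (List (String × String))) : (pvFuentes l).Nodup :=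
  pvFuentes_go_nodup l [] List.nodup_nil

theorem pvFuentes_concat (l : List (List (String × String))) (c : List (String × String))
    (o : String) (h : pvGet c "ip_origen" = some o) :
    pvFuentes (l ++ [c]) =
      if o ∈ pvFuentes l then pvFuentes l else pvFuentes l ++ [o] := by
  unfold pvFuentes
  rw [List.foldl_append, List.foldl_cons, List.foldl_nil]
  show (match pvGet c "ip_origen" with
    | some o => if o ∈ pvFuentes l then pvFuentes l else pvFuentes l ++ [o]
    | none => pvFuentes l) = _
  rw [h]
  rfl

theorem pvSet_ofList_concat {α : Type} [BEq α] (xs : List α) (x : α) :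
    PySem.Set.ofList (xs ++ [x]) = PySem.Set.add (PySem.Set.ofList xs) x := by
  rw [PySem.Set.ofList_eq_foldl, PySem.Set.ofList_eq_foldl, List.foldl_append]
  rfl

theorem pvDestinos_concat (l : List (List (String × String))) (c : List (String × String))
    (o t : String) (ho : pvGet c "ip_origen" = some o) (ht : pvGet c "ip_destino" = some t)
    (src : String) :
    pvDestinos (l ++ [c]) src =
      if o = src then PySem.Set.add (pvDestinos l src) t else pvDestinos l src := by
  unfold pvDestinos
  rw [List.filter_append, List.filterMap_append]
  by_cases h : o = src
  · subst h
    simp only [List.filter_cons, List.filter_nil, ho, beq_self_eq_true, if_pos]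
    simp only [List.filterMap_cons, List.filterMap_nil, ht]
    exact pvSet_ofList_concat _ t
  · have : (pvGet c "ip_origen" == some src) = false := by
      simp [ho, h]
    simp [this, h]

-- the main invariant: A's dict, as items, is B's result
theorem pv_main (l : List (List (String × String)))
    (hpre : ∀ com ∈ l, (PySem.Dict.ofList com).contains "ip_origen" = true ∧
      (PySem.Dict.ofList com).contains "ip_destino" = true) :
    (l.foldl pvStepA PySem.Dict.empty).items =
      (pvFuentes l).map (fun src => (src, pvDestinos l src)) := by
  induction l using List.reverseRecOn with
  | nil => rfl
  | append_singleton l c ih =>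
    have hpre' : ∀ com ∈ l, (PySem.Dict.ofList com).contains "ip_origen" = true ∧
        (PySem.Dict.ofList com).contains "ip_destino" = true :=
      fun com hc => hpre com (by simp [hc])
    have hc := hpre c (by simp)
    obtain ⟨o, ho⟩ : ∃ o, pvGet c "ip_origen" = some o := by
      have := hc.1
      rw [PySem.Dict.contains_eq_isSome_get?] at this
      exact Option.isSome_iff_exists.mp this
    obtain ⟨t, ht⟩ : ∃ t, pvGet c "ip_destino" = some t := by
      have := hc.2
      rw [PySem.Dict.contains_eq_isSome_get?] at this
      exact Option.isSome_iff_exists.mp this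
    have ihl := ih hpre'
    set d := l.foldl pvStepA PySem.Dict.empty with hd
    have hkeys : d.keys = pvFuentes l := by
      show d.items.map Prod.fst = _
      rw [ihl, List.map_map]
      have hcomp : (Prod.fst ∘ fun src => (src, pvDestinos l src)) = id := rfl
      rw [hcomp, List.map_id]
    have hnodup : d.keys.Nodup := by rw [hkeys]; exact pvFuentes_nodup l
    rw [List.foldl_append, List.foldl_cons, List.foldl_nil, ← hd]
    simp only [pvStepA, ho, ht]
    by_cases hmem : o ∈ pvFuentes l
    · -- existing source: overwrite in place
      have hcontains : d.contains o = true := by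
        rw [PySem.Dict.contains_iff_mem_keys, hkeys]; exact hmem
      have hgetD : d.getD o [] = pvDestinos l o :=
        PySem.Dict.getD_of_mem_items d (by rw [ihl]; exact List.mem_map_of_mem hmem) hnodup []
      rw [if_pos hcontains, PySem.Dict.items_insert_of_contains d _ hcontains, ihl,
        pvFuentes_concat l c o ho, if_pos hmem, List.map_map]
      apply List.map_congr_left
      intro src hsrc
      by_cases h : src = o
      · subst h
        simp [pvDestinos_concat l c src t ho ht, hgetD]
      · have : (src == o) = false := by simp [h]
        simp [pvDestinos_concat l c o t ho ht, Ne.symm h, h]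
    · -- new source: append
      have hcontains : d.contains o = false := by
        rw [Bool.eq_false_iff]
        intro hcon
        rw [PySem.Dict.contains_iff_mem_keys, hkeys] at hcon
        exact hmem hcon
      have hempty : pvDestinos l o = [] := by
        unfold pvDestinos
        have : l.filter (fun com => pvGet com "ip_origen" == some o) = [] := by
          rw [List.filter_eq_nil_iff]
          intro com hcom hbeq
          exact hmem ((pvFuentes_mem l o).mpr ⟨com, hcom, by simpa using hbeq⟩)
        rw [this]; rfl
      rw [if_neg (by simp [hcontains]), PySem.Dict.items_insert_of_not_contains d _ hcontains,
        ihl, pvFuentes_concat l c o ho, if_neg hmem, List.map_append]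
      congr 1
      · apply List.map_congr_left
        intro src hsrc
        have hne : o ≠ src := fun h => hmem (h ▸ hsrc)
        rw [pvDestinos_concat l c o t ho ht, if_neg hne]
      · simp only [List.map_cons, List.map_nil]
        rw [pvDestinos_concat l c o t ho ht, if_pos rfl, hempty]
        rfl

-- ===== VERDICT (by name: the statement is the Claim_ definition above) =====
theorem obtener_conexiones_spec : Claim_equal_obtener_conexiones := by
  intro comunicaciones _ hpre
  show obtener_conexiones comunicaciones = obtener_conexiones_alt comunicaciones
  unfold obtener_conexiones obtener_conexiones_alt
  exact pv_main comunicaciones hpre
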